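-- pv_equiv track=rewrite | github.com/devdiegocardoso/AdventOfCode | year/2015/day_05/aoc201505.py | find_pairs_without_overlap
-- ===== SOURCE A (Python) =====
-- def find_pairs_without_overlap(entry):
--     c_dict = {}
--     i_dict = {}
--     for i in range(len(entry)-1):
--         c_dict[(entry[i],entry[i+1])] = c_dict.get((entry[i],entry[i+1]),0)
--         last_pair = i_dict.get((entry[i],entry[i+1]),(-1,-1))
--         if last_pair == (-1, -1) or last_pair != (i - 1, i):
--             i_dict[(entry[i],entry[i+1])] = (i,i+1)
--             c_dict[(entry[i],entry[i+1])] += 1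
--     return any(value >= 2 for value in c_dict.values())
-- ===== SOURCE B (Python) =====
-- def find_pairs_without_overlap(entry):
--     return any(entry[i:i+2] in entry[i+2:] for i in range(len(entry)-1))
-- ===== Notes on version B (the rewrite author's own statement) =====
-- stated objective: idiomatic
-- what changed: Replaces the two-dict greedy pair-counting pass with a direct substring search: for each position i, test whether the pair entry[i:i+2] occurs again in the non-overlapping suffix entry[i+2:], returning True on the first hit (short-circuit; C-level str search) instead of always scanning the whole string and maintaining two dicts.
import Mathlib
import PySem

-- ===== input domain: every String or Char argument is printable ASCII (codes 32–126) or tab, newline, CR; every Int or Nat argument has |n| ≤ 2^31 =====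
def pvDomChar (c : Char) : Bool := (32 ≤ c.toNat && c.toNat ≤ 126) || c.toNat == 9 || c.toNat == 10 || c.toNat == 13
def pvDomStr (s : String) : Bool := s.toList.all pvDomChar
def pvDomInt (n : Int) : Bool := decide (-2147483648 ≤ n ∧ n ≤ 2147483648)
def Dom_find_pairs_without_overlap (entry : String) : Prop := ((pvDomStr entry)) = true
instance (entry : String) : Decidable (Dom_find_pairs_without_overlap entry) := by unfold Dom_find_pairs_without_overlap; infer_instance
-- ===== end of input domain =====

-- B replaces A's two-dict greedy pair-counting pass by the idiomatic substring search
-- 'any(entry[i:i+2] in entry[i+2:] for i in range(len(entry)-1))'; return values proved equal.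

-- ===== PORT A =====
-- one step of A's for-loop; the state is the pair (c_dict, i_dict)
def fpStepA (l : List Char)
    (st : PySem.Dict (Char × Char) Int × PySem.Dict (Char × Char) (Int × Int)) (i : Int) :
    PySem.Dict (Char × Char) Int × PySem.Dict (Char × Char) (Int × Int) :=
  let key := (PySem.List.pyGetD l i ' ', PySem.List.pyGetD l (i + 1) ' ')
  let c_dict := st.1.insert key (st.1.getD key 0)
  let last_pair := st.2.getD key (-1, -1)
  if last_pair = ((-1 : Int), (-1 : Int)) ∨ last_pair ≠ (i - 1, i) then
    (c_dict.insert key (c_dict.getD key 0 + 1), st.2.insert key (i, i + 1))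
  else
    (c_dict, st.2)

def find_pairs_without_overlap (entry : String) : Bool :=
  let l := entry.toList
  let st := (PySem.List.pyRange 0 (PySem.Str.len entry - 1) 1).foldl (fpStepA l)
      (PySem.Dict.empty, PySem.Dict.empty)
  st.1.values.any (fun v => decide (2 ≤ v))

-- ===== PORT B =====
def find_pairs_without_overlap_alt (entry : String) : Bool :=
  let l := entry.toList
  (PySem.List.pyRange 0 (PySem.Str.len entry - 1) 1).any (fun i =>
    PySem.Chars.isIn (PySem.List.slice l (some i) (some (i + 2)))
      (PySem.List.slice l (some (i + 2)) none))

-- ===== PRECONDITION & SPEC =====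
def Spec_find_pairs_without_overlap (entry : String) (out : Bool) : Prop := out = find_pairs_without_overlap_alt entry
instance (entry : String) (out : Bool) : Decidable (Spec_find_pairs_without_overlap entry out) := by unfold Spec_find_pairs_without_overlap; infer_instance

-- ===== CLAIM (what is proved, stated in full; the proofs are below) =====
def Claim_equal_find_pairs_without_overlap : Prop := ∀ (entry : String), Dom_find_pairs_without_overlap entry → Spec_find_pairs_without_overlap entry (find_pairs_without_overlap entry)

-- ===== LEMMAS AND PROOFS =====

-- the pair of characters at position k (defaulted; only used with k + 1 < l.length)
def fpK (l : List Char) (k : Nat) : Char × Char := (l.getD k ' ', l.getD (k + 1) ' ')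

-- the common specification: some two-character pair recurs at least two positions later
def fpP (l : List Char) : Prop :=
  ∃ a b : Nat, a + 2 ≤ b ∧ b + 1 < l.length ∧ fpK l a = fpK l b

theorem fp_pair_infix (x y : Char) (t : List Char) :
    [x, y] <:+: t ↔ ∃ j : Nat, t[j]? = some x ∧ t[j + 1]? = some y := by
  constructor
  · rintro ⟨u, v, rfl⟩
    refine ⟨u.length, ?_, ?_⟩
    · simp
    · rw [show u.length + 1 = (u ++ [x]).length by simp]
      rw [show u ++ [x, y] ++ v = (u ++ [x]) ++ ([y] ++ v) by simp]
      simp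
  · rintro ⟨j, hx, hy⟩
    have hj1 : j + 1 < t.length := by
      have := List.getElem?_eq_some_iff.mp hy
      exact this.1
    refine ⟨t.take j, t.drop (j + 2), ?_⟩
    have h1 : t.drop j = x :: t.drop (j + 1) := by
      rw [List.drop_eq_getElem_cons (by omega)]
      have : t[j] = x := by
        have := List.getElem?_eq_some_iff.mp hx
        exact this.2
      rw [this]
    have h2 : t.drop (j + 1) = y :: t.drop (j + 2) := by
      rw [List.drop_eq_getElem_cons hj1]
      have : t[j+1] = y := (List.getElem?_eq_some_iff.mp hy).2
      rw [this]
    calc t.take j ++ [x, y] ++ t.drop (j + 2)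
        = t.take j ++ t.drop j := by rw [h1, h2]; simp
      _ = t := by simp

-- the slice entry[k:k+2] for k+1 < length is the two-element pair
theorem fp_slice_pair (l : List Char) (k : Nat) (h : k + 1 < l.length) :
    (l.drop k).take 2 = [l[k], l[k+1]] := by
  rw [List.drop_eq_getElem_cons (by omega), List.drop_eq_getElem_cons h]
  rfl

theorem fp_alt_iff (entry : String) :
    find_pairs_without_overlap_alt entry = true ↔ fpP entry.toList := by
  unfold find_pairs_without_overlap_alt
  simp only [List.any_eq_true, PySem.Str.len_eq]
  set l := entry.toList with hl
  constructor
  · rintro ⟨i, hmem, hpred⟩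
    rw [PySem.List.mem_pyRange_one] at hmem
    obtain ⟨h0, hlt⟩ := hmem
    obtain ⟨k, rfl⟩ : ∃ k : Nat, i = (k : Int) := ⟨i.toNat, (Int.toNat_of_nonneg h0).symm⟩
    have hk : k + 1 < l.length := by exact_mod_cast (by omega : (k : Int) + 1 < (l.length : Int))
    rw [show (k : Int) + 2 = ((k + 2 : Nat) : Int) by push_cast; ring] at hpred
    rw [PySem.List.slice_natCast, PySem.List.slice_from_natCast] at hpred
    rw [show k + 2 - k = 2 by omega, fp_slice_pair l k hk] at hpred
    rw [PySem.Chars.isIn_iff_infix, fp_pair_infix] at hpred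
    obtain ⟨j, hx, hy⟩ := hpred
    rw [List.getElem?_drop] at hx hy
    have hb1 : k + 2 + (j + 1) < l.length := (List.getElem?_eq_some_iff.mp hy).1
    refine ⟨k, k + 2 + j, by omega, by omega, ?_⟩
    have hxv : l[k + 2 + j]'(by omega) = l[k] := (List.getElem?_eq_some_iff.mp hx).2
    have hyv : l[k + 2 + (j + 1)]'(by omega) = l[k + 1] := (List.getElem?_eq_some_iff.mp hy).2
    unfold fpK
    rw [List.getD_eq_getElem l ' ' (by omega : k < l.length),
        List.getD_eq_getElem l ' ' (by omega : k + 1 < l.length),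
        List.getD_eq_getElem l ' ' (by omega : k + 2 + j < l.length),
        List.getD_eq_getElem l ' ' (by omega : k + 2 + j + 1 < l.length)]
    refine Prod.ext ?_ ?_
    · simpa using hxv.symm
    · exact (List.getElem?_eq_some_iff.mp
        (by rw [show k + 2 + j + 1 = k + 2 + (j + 1) by omega]; exact hy)).2.symm
  · rintro ⟨a, b, hab, hb1, hK⟩
    refine ⟨(a : Int), ?_, ?_⟩
    · rw [PySem.List.mem_pyRange_one]
      constructor
      · positivity
      · have : (a : Int) + 2 < (l.length : Int) := by exact_mod_cast (by omega : a + 2 < l.length)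
        omega
    · rw [show (a : Int) + 2 = ((a + 2 : Nat) : Int) by push_cast; ring]
      rw [PySem.List.slice_natCast, PySem.List.slice_from_natCast,
          show a + 2 - a = 2 by omega, fp_slice_pair l a (by omega)]
      rw [PySem.Chars.isIn_iff_infix, fp_pair_infix]
      refine ⟨b - (a + 2), ?_, ?_⟩
      · rw [List.getElem?_drop, show a + 2 + (b - (a + 2)) = b by omega]
        rw [List.getElem?_eq_some_iff]
        refine ⟨by omega, ?_⟩
        have h1 : l.getD a ' ' = l.getD b ' ' := congrArg Prod.fst hK
        rw [List.getD_eq_getElem l ' ' (show a < l.length by omega),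
            List.getD_eq_getElem l ' ' (show b < l.length by omega)] at h1
        exact h1.symm
      · rw [List.getElem?_drop, show a + 2 + (b - (a + 2) + 1) = b + 1 by omega]
        rw [List.getElem?_eq_some_iff]
        refine ⟨by omega, ?_⟩
        have h1 : l.getD (a + 1) ' ' = l.getD (b + 1) ' ' := congrArg Prod.snd hK
        rw [List.getD_eq_getElem l ' ' (show a + 1 < l.length by omega),
            List.getD_eq_getElem l ' ' (show b + 1 < l.length by omega)] at h1
        exact h1.symm

-- ===== A-side machinery =====
def fpOcc (l : List Char) (m : Nat) (p : Char × Char) : Prop := ∃ a, a < m ∧ fpK l a = p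
def fpGood (l : List Char) (m : Nat) (p : Char × Char) : Prop :=
  ∃ a b, b < m ∧ a + 2 ≤ b ∧ fpK l a = p ∧ fpK l b = p

-- the per-key invariant clause: c = counted occurrences entry, ip = last recorded pair
def fpCl (l : List Char) (m : Nat) (c : Int) (ip : Int × Int) (p : Char × Char) : Prop :=
  (¬ fpOcc l m p → c = 0 ∧ ip = (-1, -1)) ∧
  (fpOcc l m p → ¬ fpGood l m p → ∃ f, f < m ∧ fpK l f = p ∧
      (∀ a, a < m → fpK l a = p → a = f ∨ a = f + 1) ∧ c = 1 ∧ ip = ((f : Int), (f : Int) + 1)) ∧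
  (fpGood l m p → 2 ≤ c)

def fpInv (l : List Char) (m : Nat)
    (st : PySem.Dict (Char × Char) Int × PySem.Dict (Char × Char) (Int × Int)) : Prop :=
  st.1.keys.Nodup ∧ ∀ p, fpCl l m (st.1.getD p 0) (st.2.getD p (-1, -1)) p

theorem fpOcc_succ (l : List Char) (m : Nat) (q : Char × Char) :
    fpOcc l (m + 1) q ↔ fpOcc l m q ∨ fpK l m = q := by
  constructor
  · rintro ⟨a, ha, hK⟩
    rcases Nat.lt_succ_iff_lt_or_eq.mp ha with h | rfl
    · exact Or.inl ⟨a, h, hK⟩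
    · exact Or.inr hK
  · rintro (⟨a, ha, hK⟩ | hK)
    · exact ⟨a, by omega, hK⟩
    · exact ⟨m, by omega, hK⟩

theorem fpGood_succ (l : List Char) (m : Nat) (q : Char × Char) :
    fpGood l (m + 1) q ↔ fpGood l m q ∨ (fpK l m = q ∧ ∃ a, a + 2 ≤ m ∧ fpK l a = q) := by
  constructor
  · rintro ⟨a, b, hb, hab, hKa, hKb⟩
    rcases Nat.lt_succ_iff_lt_or_eq.mp hb with h | rfl
    · exact Or.inl ⟨a, b, h, hab, hKa, hKb⟩
    · exact Or.inr ⟨hKb, a, hab, hKa⟩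
  · rintro (⟨a, b, hb, hab, hKa, hKb⟩ | ⟨hKm, a, ha, hKa⟩)
    · exact ⟨a, b, by omega, hab, hKa, hKb⟩
    · exact ⟨a, m, by omega, ha, hKa, hKm⟩

theorem fpGood_mono (l : List Char) (m : Nat) (q : Char × Char) (h : fpGood l m q) :
    fpGood l (m + 1) q := (fpGood_succ l m q).mpr (Or.inl h)

theorem fpOcc_of_good (l : List Char) (m : Nat) (q : Char × Char) (h : fpGood l m q) :
    fpOcc l m q := by
  obtain ⟨a, b, hb, hab, hKa, _⟩ := h
  exact ⟨a, by omega, hKa⟩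

-- an unaffected key's clause survives the step
theorem fpCl_succ_ne (l : List Char) (m : Nat) (c : Int) (ip : Int × Int) (q : Char × Char)
    (hne : fpK l m ≠ q) (h : fpCl l m c ip q) : fpCl l (m + 1) c ip q := by
  obtain ⟨h1, h2, h3⟩ := h
  have hocc : fpOcc l (m + 1) q ↔ fpOcc l m q := by
    rw [fpOcc_succ]; exact or_iff_left hne
  have hgood : fpGood l (m + 1) q ↔ fpGood l m q := by
    rw [fpGood_succ]
    constructor
    · rintro (h | ⟨h, _⟩)
      · exact h
      · exact absurd h hne
    · exact Or.inl
  refine ⟨fun hn => h1 (by rw [← hocc]; exact hn), fun ho hg => ?_, fun hg => h3 (hgood.mp hg)⟩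
  obtain ⟨f, hf, hKf, hall, hc, hip⟩ := h2 (hocc.mp ho) (fun hg' => hg (hgood.mpr hg'))
  refine ⟨f, by omega, hKf, fun a ha hKa => ?_, hc, hip⟩
  rcases Nat.lt_succ_iff_lt_or_eq.mp ha with h | rfl
  · exact hall a h hKa
  · exact absurd hKa hne

-- the key computed by the step at index m is fpK l m
theorem fpStepA_key (l : List Char) (m : Nat) :
    ((PySem.List.pyGetD l (m : Int) ' ', PySem.List.pyGetD l ((m : Int) + 1) ' ')) = fpK l m := by
  rw [show ((m : Int) + 1) = ((m + 1 : Nat) : Int) by push_cast; ring]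
  rw [PySem.List.pyGetD_natCast, PySem.List.pyGetD_natCast]
  rfl

theorem fpInv_step (l : List Char) (m : Nat)
    (st : PySem.Dict (Char × Char) Int × PySem.Dict (Char × Char) (Int × Int))
    (h : fpInv l m st) : fpInv l (m + 1) (fpStepA l st (m : Int)) := by
  obtain ⟨hnd, hcl⟩ := h
  unfold fpStepA
  rw [fpStepA_key]
  set p := fpK l m with hp
  by_cases hocc : fpOcc l m p
  · by_cases hgood : fpGood l m p
    · -- already counted twice: value stays ≥ 2 whatever the branch does
      have h2 : 2 ≤ st.1.getD p 0 := (hcl p).2.2 hgood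
      by_cases hcond : st.2.getD p (-1, -1) = ((-1 : Int), (-1 : Int)) ∨
          st.2.getD p (-1, -1) ≠ ((m : Int) - 1, (m : Int))
      · rw [if_pos hcond]
        refine ⟨PySem.Dict.nodup_keys_insert _ _ _ (PySem.Dict.nodup_keys_insert _ _ _ hnd), fun q => ?_⟩
        by_cases hq : q = p
        · subst hq
          simp only [PySem.Dict.getD_insert_self]
          refine ⟨fun hn => absurd ((fpOcc_succ l m p).mpr (Or.inr rfl)) hn, ?_, ?_⟩
          · intro _ hg; exact absurd (fpGood_mono l m p hgood) hg
          · intro _; omega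
        · simp only [PySem.Dict.getD_insert_of_ne _ _ _ hq]
          exact fpCl_succ_ne l m _ _ q (fun h => hq h.symm) (hcl q)
      · rw [if_neg hcond]
        refine ⟨PySem.Dict.nodup_keys_insert _ _ _ hnd, fun q => ?_⟩
        by_cases hq : q = p
        · subst hq
          simp only [PySem.Dict.getD_insert_self]
          refine ⟨fun hn => absurd ((fpOcc_succ l m p).mpr (Or.inr rfl)) hn, ?_, ?_⟩
          · intro _ hg; exact absurd (fpGood_mono l m p hgood) hg
          · intro _; omega
        · simp only [PySem.Dict.getD_insert_of_ne _ _ _ hq]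
          exact fpCl_succ_ne l m _ _ q (fun h => hq h.symm) (hcl q)
    · -- counted exactly once, at (f, f+1)
      obtain ⟨f, hf, hKf, hall, hc, hip⟩ := (hcl p).2.1 hocc hgood
      by_cases hfm : f + 1 = m
      · -- overlapping repeat: skipped
        have hcond : ¬ (st.2.getD p (-1, -1) = ((-1 : Int), (-1 : Int)) ∨
            st.2.getD p (-1, -1) ≠ ((m : Int) - 1, (m : Int))) := by
          rw [hip, not_or, not_not]
          constructor
          · intro h; rw [Prod.mk.injEq] at h; omega
          · rw [Prod.mk.injEq]; constructor <;> omega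
        rw [if_neg hcond]
        refine ⟨PySem.Dict.nodup_keys_insert _ _ _ hnd, fun q => ?_⟩
        by_cases hq : q = p
        · subst hq
          simp only [PySem.Dict.getD_insert_self]
          have hng : ¬ fpGood l (m + 1) p := by
            rw [fpGood_succ]
            rintro (hg | ⟨_, a, ha, hKa⟩)
            · exact hgood hg
            · rcases hall a (by omega) hKa with rfl | rfl <;> omega
          refine ⟨fun hn => absurd ((fpOcc_succ l m p).mpr (Or.inr rfl)) hn, ?_, fun hg => absurd hg hng⟩
          intro _ _
          refine ⟨f, by omega, hKf, fun a ha hKa => ?_, hc, hip⟩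
          rcases Nat.lt_succ_iff_lt_or_eq.mp ha with h' | rfl
          · exact hall a h' hKa
          · right; omega
        · simp only [PySem.Dict.getD_insert_of_ne _ _ _ hq]
          exact fpCl_succ_ne l m _ _ q (fun h => hq h.symm) (hcl q)
      · -- non-overlapping repeat: counted, now ≥ 2
        have hcond : st.2.getD p (-1, -1) = ((-1 : Int), (-1 : Int)) ∨
            st.2.getD p (-1, -1) ≠ ((m : Int) - 1, (m : Int)) := by
          right
          rw [hip]
          intro h
          rw [Prod.mk.injEq] at h
          omega
        rw [if_pos hcond]
        have hgood' : fpGood l (m + 1) p := by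
          rw [fpGood_succ]
          exact Or.inr ⟨rfl, f, by omega, hKf⟩
        refine ⟨PySem.Dict.nodup_keys_insert _ _ _ (PySem.Dict.nodup_keys_insert _ _ _ hnd), fun q => ?_⟩
        by_cases hq : q = p
        · subst hq
          simp only [PySem.Dict.getD_insert_self]
          refine ⟨fun hn => absurd ((fpOcc_succ l m p).mpr (Or.inr rfl)) hn,
            fun _ hg => absurd hgood' hg, fun _ => by omega⟩
        · simp only [PySem.Dict.getD_insert_of_ne _ _ _ hq]
          exact fpCl_succ_ne l m _ _ q (fun h => hq h.symm) (hcl q)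
  · -- fresh pair: first count
    obtain ⟨hc0, hip0⟩ := (hcl p).1 hocc
    have hcond : st.2.getD p (-1, -1) = ((-1 : Int), (-1 : Int)) ∨
        st.2.getD p (-1, -1) ≠ ((m : Int) - 1, (m : Int)) := Or.inl hip0
    rw [if_pos hcond]
    refine ⟨PySem.Dict.nodup_keys_insert _ _ _ (PySem.Dict.nodup_keys_insert _ _ _ hnd), fun q => ?_⟩
    by_cases hq : q = p
    · subst hq
      simp only [PySem.Dict.getD_insert_self]
      have hng : ¬ fpGood l (m + 1) p := by
        rw [fpGood_succ]
        rintro (hg | ⟨_, a, ha, hKa⟩)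
        · exact hocc (fpOcc_of_good l m p hg)
        · exact hocc ⟨a, by omega, hKa⟩
      refine ⟨fun hn => absurd ((fpOcc_succ l m p).mpr (Or.inr rfl)) hn, ?_, fun hg => absurd hg hng⟩
      intro _ _
      refine ⟨m, by omega, rfl, fun a ha hKa => ?_, by rw [hc0]; norm_num, rfl⟩
      rcases Nat.lt_succ_iff_lt_or_eq.mp ha with h' | rfl
      · exact absurd ⟨a, h', hKa⟩ hocc
      · left; rfl
    · simp only [PySem.Dict.getD_insert_of_ne _ _ _ hq]
      exact fpCl_succ_ne l m _ _ q (fun h => hq h.symm) (hcl q)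

theorem fpFold_inv (l : List Char) (m : Nat) :
    fpInv l m (List.foldl (fun st (k : Nat) => fpStepA l st (k : Int))
      (PySem.Dict.empty, PySem.Dict.empty) (List.range m)) := by
  induction m with
  | zero =>
    refine ⟨PySem.Dict.nodup_keys_empty, fun p => ?_⟩
    refine ⟨fun _ => ⟨PySem.Dict.getD_empty _ _, PySem.Dict.getD_empty _ _⟩, ?_, ?_⟩
    · rintro ⟨a, ha, _⟩; omega
    · rintro ⟨a, b, hb, _, _, _⟩; omega
  | succ k ih =>
    rw [List.range_succ, List.foldl_append]
    exact fpInv_step l k _ ih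

theorem fp_values_iff (c : PySem.Dict (Char × Char) Int) (hnd : c.keys.Nodup) :
    (c.values.any (fun v => decide (2 ≤ v)) = true) ↔ ∃ p, 2 ≤ c.getD p 0 := by
  have hval : c.values = c.items.map (·.2) := rfl
  rw [hval, List.any_eq_true]
  constructor
  · rintro ⟨v, hv, hdec⟩
    rw [decide_eq_true_eq] at hdec
    obtain ⟨⟨p, w⟩, hmem, rfl⟩ := List.mem_map.mp hv
    exact ⟨p, by rw [PySem.Dict.getD_of_mem_items c hmem hnd]; exact hdec⟩
  · rintro ⟨p, hp⟩
    cases h : c.get? p with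
    | none => rw [PySem.Dict.getD_of_get?_eq_none c 0 h] at hp; omega
    | some v =>
      refine ⟨v, List.mem_map.mpr ⟨(p, v), PySem.Dict.mem_items_of_get?_eq_some c h, rfl⟩, ?_⟩
      rw [decide_eq_true_eq]
      rw [PySem.Dict.getD_of_get?_eq_some c 0 h] at hp
      exact hp

theorem fp_a_iff (entry : String) :
    find_pairs_without_overlap entry = true ↔ fpP entry.toList := by
  simp only [find_pairs_without_overlap, PySem.Str.len_eq]
  set l := entry.toList with hl
  have hrange : PySem.List.pyRange 0 ((l.length : Int) - 1) 1
      = (List.range (l.length - 1)).map (fun k : Nat => (k : Int)) := by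
    cases hn : l.length with
    | zero => decide
    | succ k =>
      rw [show ((k + 1 : Nat) : Int) - 1 = (k : Int) by push_cast; ring,
        show k + 1 - 1 = k by omega]
      exact PySem.List.pyRange_zero_natCast k
  rw [hrange, List.foldl_map]
  have hinv := fpFold_inv l (l.length - 1)
  rw [fp_values_iff _ hinv.1]
  constructor
  · rintro ⟨p, hp⟩
    have hcl := hinv.2 p
    by_cases hocc : fpOcc l (l.length - 1) p
    · by_cases hgood : fpGood l (l.length - 1) p
      · obtain ⟨a, b, hb, hab, hKa, hKb⟩ := hgood
        exact ⟨a, b, hab, by omega, hKa.trans hKb.symm⟩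
      · obtain ⟨_, _, _, _, hc, _⟩ := hcl.2.1 hocc hgood
        omega
    · obtain ⟨hc, _⟩ := hcl.1 hocc
      omega
  · rintro ⟨a, b, hab, hb1, hK⟩
    refine ⟨fpK l a, (hinv.2 (fpK l a)).2.2 ⟨a, b, by omega, hab, rfl, hK.symm⟩⟩

-- ===== VERDICT (by name: the statement is the Claim_ definition above) =====
theorem find_pairs_without_overlap_spec : Claim_equal_find_pairs_without_overlap := by
  intro entry _
  unfold Spec_find_pairs_without_overlap
  rw [Bool.eq_iff_iff, fp_a_iff, fp_alt_iff]
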